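-- pv_equiv track=rewrite | github.com/ASSERT-KTH/Mokav | experiments/pynguin/c4b/return-lst/generated_tests/src_375/7/src_375.py | func
-- ===== SOURCE A (Python) =====
-- def func(*args):
-- 	ret_values = []
--
-- 	a = args[0]
-- 	b = []
-- 	for k in a:
-- 	    b.append(k)
-- 	if (len(b) < 7):
-- 	    ret_values.append('NO')
-- 	elif (len(b) >= 7):
-- 	    i = 0
-- 	    while (i <= (len(b) - 7)):
-- 	        if ((((((((int(b[i]) + int(b[(i + 1)])) + int(b[(i + 2)])) + int(b[(i + 3)])) + int(b[(i + 4)])) + int(b[(i + 5)])) + int(b[(i + 6)])) == 0) or (((((((int(b[i]) + int(b[(i + 1)])) + int(b[(i + 2)])) + int(b[(i + 3)])) + int(b[(i + 4)])) + int(b[(i + 5)])) + int(b[(i + 6)])) == 7)):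
-- 	            ret_values.append('YES')
-- 	            break
-- 	        else:
-- 	            i += 1
-- 	    else:
-- 	        ret_values.append('NO')
--
-- 	return ret_values
-- ===== SOURCE B (Python) =====
-- def func(*args):
--     b = list(args[0])
--     if len(b) < 7:
--         return ['NO']
--     pre = [0]
--     s = 0
--     for k in b:
--         s += int(k)
--         pre.append(s)
--     return ['YES' if any(pre[i + 7] - pre[i] in (0, 7) for i in range(len(b) - 6)) else 'NO']
-- ===== Notes on version B (the rewrite author's own statement) =====
-- stated objective: faster
-- what changed: B replaces A's per-position re-summation of each 7-element window with a single prefix-sum pass and an any() over window differences pre[i+7]-pre[i].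
import Mathlib
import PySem

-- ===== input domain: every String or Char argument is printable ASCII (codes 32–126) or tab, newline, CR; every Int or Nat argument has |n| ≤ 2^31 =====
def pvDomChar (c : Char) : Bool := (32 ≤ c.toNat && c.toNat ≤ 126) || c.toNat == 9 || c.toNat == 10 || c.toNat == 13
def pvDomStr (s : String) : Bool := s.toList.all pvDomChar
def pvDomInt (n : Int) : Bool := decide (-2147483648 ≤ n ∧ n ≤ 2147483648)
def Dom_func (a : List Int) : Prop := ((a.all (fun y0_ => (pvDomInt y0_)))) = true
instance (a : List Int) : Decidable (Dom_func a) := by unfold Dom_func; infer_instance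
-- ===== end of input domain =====

-- B computes each 7-window sum as a difference of two prefix sums instead of re-adding 7 terms; objective: alternative.

-- ===== PORT A =====
-- the while loop: i ranges while i ≤ len(b) - 7; re-sums the 7-term window each step
def funcLoop (b : List Int) (i : Nat) : List String :=
  if h : i ≤ b.length - 7 ∧ 7 ≤ b.length then
    if ((((((b.getD i 0 + b.getD (i+1) 0) + b.getD (i+2) 0) + b.getD (i+3) 0)
          + b.getD (i+4) 0) + b.getD (i+5) 0) + b.getD (i+6) 0 = 0)
       ∨ ((((((b.getD i 0 + b.getD (i+1) 0) + b.getD (i+2) 0) + b.getD (i+3) 0)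
          + b.getD (i+4) 0) + b.getD (i+5) 0) + b.getD (i+6) 0 = 7) then
      ["YES"]
    else
      funcLoop b (i+1)
  else
    ["NO"]
termination_by b.length - 6 - i
decreasing_by omega

def func (a : List Int) : List String :=
  let b := a
  if b.length < 7 then ["NO"]
  else funcLoop b 0

-- ===== PORT B =====
-- running prefix-sum fold: carries (pre, s); pre starts as [0]
def func_alt (a : List Int) : List String :=
  let b := a
  if b.length < 7 then ["NO"]
  else
    let pre := (b.foldl (fun p k => (p.1 ++ [p.2 + k], p.2 + k)) (([0] : List Int), (0 : Int))).1
    if (List.range (b.length - 6)).any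
        (fun i => decide (pre.getD (i+7) 0 - pre.getD i 0 = 0 ∨ pre.getD (i+7) 0 - pre.getD i 0 = 7))
    then ["YES"] else ["NO"]

-- ===== PRECONDITION & SPEC =====
def Spec_func (a : List Int) (out : List String) : Prop := out = func_alt a
instance (a : List Int) (out : List String) : Decidable (Spec_func a out) := by unfold Spec_func; infer_instance

-- ===== CLAIM (what is proved, stated in full; the proofs are below) =====
def Claim_equal_func : Prop := ∀ (a : List Int), Dom_func a → Spec_func a (func a)

-- ===== LEMMAS AND PROOFS =====

-- the window predicate both programs test
def winP (b : List Int) (i : Nat) : Bool :=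
  decide ((((((b.getD i 0 + b.getD (i+1) 0) + b.getD (i+2) 0) + b.getD (i+3) 0)
          + b.getD (i+4) 0) + b.getD (i+5) 0) + b.getD (i+6) 0 = 0
        ∨ (((((b.getD i 0 + b.getD (i+1) 0) + b.getD (i+2) 0) + b.getD (i+3) 0)
          + b.getD (i+4) 0) + b.getD (i+5) 0) + b.getD (i+6) 0 = 7)

-- spine of the prefix-sum list
def presums (s : Int) : List Int → List Int
  | [] => []
  | k :: t => (s + k) :: presums (s + k) t

theorem foldl_presums (b : List Int) (acc : List Int) (s : Int) :
    b.foldl (fun p k => (p.1 ++ [p.2 + k], p.2 + k)) (acc, s)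
      = (acc ++ presums s b, s + b.sum) := by
  induction b generalizing acc s with
  | nil => simp [presums]
  | cons k t ih =>
      simp only [List.foldl_cons, ih, presums, List.sum_cons, Prod.mk.injEq]
      exact ⟨by simp, by ring⟩

theorem presums_getD (b : List Int) (s : Int) (k : Nat) (hk : k < b.length) :
    (presums s b).getD k 0 = s + (b.take (k+1)).sum := by
  induction b generalizing s k with
  | nil => simp at hk
  | cons x t ih =>
      cases k with
      | zero => simp [presums]
      | succ k =>
          simp only [presums, List.getD_cons_succ, List.take_succ_cons, List.sum_cons]
          rw [ih (s + x) k (by simpa using hk)]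
          ring

theorem take_succ_sum (b : List Int) (j : Nat) (hj : j < b.length) :
    (b.take (j+1)).sum = (b.take j).sum + b.getD j 0 := by
  induction b generalizing j with
  | nil => simp at hj
  | cons x t ih =>
      cases j with
      | zero => simp
      | succ j =>
          simp only [List.take_succ_cons, List.sum_cons, List.getD_cons_succ]
          rw [ih j (by simpa using hj)]
          ring

-- pre-sum difference equals the 7-term window sum
theorem pre_diff (b : List Int) (i : Nat) (h : i + 7 ≤ b.length) :
    let pre := (b.foldl (fun p k => (p.1 ++ [p.2 + k], p.2 + k)) (([0] : List Int), (0 : Int))).1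
    pre.getD (i+7) 0 - pre.getD i 0
      = (((((b.getD i 0 + b.getD (i+1) 0) + b.getD (i+2) 0) + b.getD (i+3) 0)
          + b.getD (i+4) 0) + b.getD (i+5) 0) + b.getD (i+6) 0 := by
  intro pre
  have hpre : pre = 0 :: presums 0 b := by
    simp only [pre, foldl_presums]; rfl
  have hget : ∀ k : Nat, k ≤ b.length → pre.getD k 0 = (b.take k).sum := by
    intro k hk
    cases k with
    | zero => simp [hpre]
    | succ k =>
        rw [hpre]
        simp only [List.getD_cons_succ]
        rw [presums_getD b 0 k (by omega)]
        ring
  rw [hget i (by omega), hget (i+7) (by omega)]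
  have h0 : (b.take (i+1)).sum = (b.take i).sum + b.getD i 0 := take_succ_sum b i (by omega)
  have h1 : (b.take (i+2)).sum = (b.take (i+1)).sum + b.getD (i+1) 0 := take_succ_sum b (i+1) (by omega)
  have h2 : (b.take (i+3)).sum = (b.take (i+2)).sum + b.getD (i+2) 0 := take_succ_sum b (i+2) (by omega)
  have h3 : (b.take (i+4)).sum = (b.take (i+3)).sum + b.getD (i+3) 0 := take_succ_sum b (i+3) (by omega)
  have h4 : (b.take (i+5)).sum = (b.take (i+4)).sum + b.getD (i+4) 0 := take_succ_sum b (i+4) (by omega)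
  have h5 : (b.take (i+6)).sum = (b.take (i+5)).sum + b.getD (i+5) 0 := take_succ_sum b (i+5) (by omega)
  have h6 : (b.take (i+7)).sum = (b.take (i+6)).sum + b.getD (i+6) 0 := take_succ_sum b (i+6) (by omega)
  omega

-- A's while loop answers YES iff some window from i onward fires
theorem funcLoop_eq_any (b : List Int) (i : Nat) (hb : 7 ≤ b.length) :
    funcLoop b i
      = (if (List.range' i (b.length - 6 - i)).any (winP b) then ["YES"] else ["NO"]) := by
  generalize hm : b.length - 6 - i = m
  induction m generalizing i with
  | zero =>
      rw [funcLoop]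
      have : ¬ (i ≤ b.length - 7 ∧ 7 ≤ b.length) := by omega
      simp [this]
  | succ m ih =>
      rw [funcLoop]
      have hc : i ≤ b.length - 7 ∧ 7 ≤ b.length := ⟨by omega, hb⟩
      rw [dif_pos hc, List.range'_succ]
      by_cases hw : winP b i = true
      · have hw' := of_decide_eq_true hw
        rw [if_pos hw']
        simp [List.any_cons, hw]
      · have hwf : winP b i = false := by simpa using hw
        have hw' : ¬ _ := fun h => hw (decide_eq_true h)
        rw [if_neg hw']
        rw [ih (i+1) (by omega)]
        rw [List.any_cons, hwf, Bool.false_or]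

theorem any_congr_mem {α : Type} (l : List α) (f g : α → Bool)
    (h : ∀ x ∈ l, f x = g x) : l.any f = l.any g := by
  induction l with
  | nil => rfl
  | cons x t ih =>
      simp only [List.any_cons, h x (by simp), ih (fun y hy => h y (by simp [hy]))]

-- B rewritten with the shared window predicate
theorem alt_eq (a : List Int) :
    func_alt a = if a.length < 7 then ["NO"]
      else if (List.range (a.length - 6)).any (winP a) then ["YES"] else ["NO"] := by
  unfold func_alt
  by_cases h : a.length < 7
  · simp [h]
  · simp only [if_neg h]
    have hpt : ∀ i ∈ List.range (a.length - 6),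
        (fun i => decide
          ((List.foldl (fun p k => (p.1 ++ [p.2 + k], p.2 + k)) (([0] : List Int), (0 : Int)) a).1.getD (i + 7) 0 -
                (List.foldl (fun p k => (p.1 ++ [p.2 + k], p.2 + k)) (([0] : List Int), (0 : Int)) a).1.getD i 0 = 0 ∨
           (List.foldl (fun p k => (p.1 ++ [p.2 + k], p.2 + k)) (([0] : List Int), (0 : Int)) a).1.getD (i + 7) 0 -
                (List.foldl (fun p k => (p.1 ++ [p.2 + k], p.2 + k)) (([0] : List Int), (0 : Int)) a).1.getD i 0 = 7)) i
          = winP a i := by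
      intro i hi
      have hi' : i + 7 ≤ a.length := by
        have := List.mem_range.mp hi; omega
      have hd := pre_diff a i hi'
      simp only at hd
      simp only [winP, hd]
    rw [any_congr_mem _ _ _ hpt]

-- ===== VERDICT (by name: the statement is the Claim_ definition above) =====
theorem func_spec : Claim_equal_func := by
  intro a _
  unfold Spec_func func
  rw [alt_eq]
  by_cases hlen : a.length < 7
  · simp [hlen]
  · simp only [if_neg hlen]
    rw [funcLoop_eq_any a 0 (by omega)]
    have hrange : List.range' 0 (a.length - 6 - 0) = List.range (a.length - 6) := by
      simp [List.range_eq_range']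
    rw [hrange]
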